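-- pv_equiv track=rewrite | github.com/Vedant0898/COL106_assignments | A-4/a4.py | wildcard_pat_hash
-- ===== SOURCE A (Python) =====
-- def identifier(c):
--     # ---------------------------------------------------------------------------
--     # | INPUT                                                                   |
--     # | c : char (A-Z and ?)                                                    |
--     # |                                                                         |
--     # | OUTPUT                                                                  |
--     # | int : -1 for '?' and 0-25 for A-Z                                       |
--     # |                                                                         |
--     # | Time Complexity  : O(1)                                                 |
--     # | Space Complexity : O(1)                                                 |
--     # ---------------------------------------------------------------------------
--     if c == "?":
--         return -1
--
--     return ord(c) - ord('A')
--
-- def wildcard_pat_hash(s, low, high, q):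
--     # ---------------------------------------------------------------------------
--     # | INPUT                                                                   |
--     # | s : document string                                                     |
--     # | low, high : end points of string which is to be hashed                  |
--     # | q : prime number                                                        |
--     # |                                                                         |
--     # | OUTPUT                                                                  |
--     # | val       - int : hash value of s[low:high]                             |
--     # | q_pos     - int : position of question mark (pos)                       |
--     # | pre_comp1 - int : precomputed value of (26^(m-1)) % q                   |
--     # | pre_comp2 - int : precomputed value of (26^(m-pos-1)) % q               |
--     # |                                                                         |
--     # | Time Complexity  : O(m)                                                 |
--     # | Space Complexity : O(log(q))                                            |
--     # ---------------------------------------------------------------------------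
--     q_pos = -1
--     val = 0
--     pre_comp1 = 1                                       # 26^(m-1) mod q
--     pre_comp2 = 1                                       # 26^(m-pos-1) mod q
--     for i in range(low, high):
--         c = s[i]
--         if q_pos >= 0:
--             pre_comp2 = (pre_comp2 * 26) % q
--         if identifier(c) == -1:
--             q_pos = i
--         if i != q_pos:
--             val = ((val * 26) % q + identifier(c)) % q
--         else:
--             val = (val * 26) % q
--
--         if i == high-1:
--             break
--         pre_comp1 = (pre_comp1 * 26) % q
--
--     return val, q_pos, pre_comp1, pre_comp2
-- ===== SOURCE B (Python) =====
-- def identifier(c):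
--     if c == "?":
--         return -1
--     return ord(c) - ord('A')
--
-- def wildcard_pat_hash(s, low, high, q):
--     # Decomposed: one scan collects the wildcard positions (first drives pre_comp2,
--     # last is the returned q_pos), then three independent mod-chain loops.
--     wilds = [i for i in range(low, high) if identifier(s[i]) == -1]
--     q_pos = wilds[-1] if wilds else -1
--
--     val = 0
--     for i in range(low, high):
--         val = (val * 26) % q
--         d = identifier(s[i])
--         if d != -1:
--             val = (val + d) % q
--
--     pre_comp1 = 1
--     for _ in range(max(0, high - low - 1)):
--         pre_comp1 = (pre_comp1 * 26) % q
--
--     pre_comp2 = 1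
--     if wilds:
--         for _ in range(high - 1 - wilds[0]):
--             pre_comp2 = (pre_comp2 * 26) % q
--
--     return val, q_pos, pre_comp1, pre_comp2
-- ===== Notes on version B (the rewrite author's own statement) =====
-- stated objective: alternative
-- what changed: A interleaves q_pos tracking, the hash, and both precomputed powers in one stateful loop with a break-guarded multiply; B first collects the wildcard positions in one scan (last gives q_pos, first drives pre_comp2) and then computes val, pre_comp1 and pre_comp2 in three independent mod-chain loops.
-- outside the precondition, e.g. on wildcard_pat_hash('AB', -2, 0, 97): A returns (0, -1, 26, 1), B returns (1, -1, 26, 1)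
import Mathlib
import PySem

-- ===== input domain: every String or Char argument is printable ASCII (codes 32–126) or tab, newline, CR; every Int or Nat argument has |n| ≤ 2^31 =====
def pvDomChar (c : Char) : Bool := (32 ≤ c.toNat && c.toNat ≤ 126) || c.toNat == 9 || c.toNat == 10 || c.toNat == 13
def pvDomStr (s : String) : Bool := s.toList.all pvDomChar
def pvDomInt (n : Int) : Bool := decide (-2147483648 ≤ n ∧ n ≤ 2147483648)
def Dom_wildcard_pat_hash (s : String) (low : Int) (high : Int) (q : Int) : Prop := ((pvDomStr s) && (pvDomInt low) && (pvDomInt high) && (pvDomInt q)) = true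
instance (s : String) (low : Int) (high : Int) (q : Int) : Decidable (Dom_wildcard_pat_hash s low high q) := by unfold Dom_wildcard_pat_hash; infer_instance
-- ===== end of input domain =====

-- B replaces A's single stateful loop by one wildcard-position scan plus three independent
-- mod-chain loops (alternative decomposition, same cost); Pre_ excludes the raising inputs
-- and negative window starts (see the comment at Pre_).


-- ===== PORT A =====
def pvIdentA (c : Char) : Int := if c = '?' then -1 else (c.toNat : Int) - 65

-- loop body of A; the '?' default of pyGet? is never used on inputs admitted by Pre_ (index in range)
def pvStepA (s : String) (high q : Int) (st : Int × Int × Int × Int) (i : Int) : Int × Int × Int × Int :=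
  let c := (PySem.Str.pyGet? s i).getD '?'
  let p2 := if 0 ≤ st.1 then PySem.Int.mod (st.2.2.2 * 26) q else st.2.2.2
  let qp := if pvIdentA c = -1 then i else st.1
  let v  := if i ≠ qp then PySem.Int.mod (PySem.Int.mod (st.2.1 * 26) q + pvIdentA c) q
            else PySem.Int.mod (st.2.1 * 26) q
  let p1 := if i = high - 1 then st.2.2.1 else PySem.Int.mod (st.2.2.1 * 26) q
  (qp, v, p1, p2)

def wildcard_pat_hash (s : String) (low : Int) (high : Int) (q : Int) : Int × Int × Int × Int :=
  let st := (PySem.List.pyRange low high 1).foldl (pvStepA s high q) (-1, 0, 1, 1)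
  (st.2.1, st.1, st.2.2.1, st.2.2.2)

-- ===== PORT B =====
def pvIdentB (c : Char) : Int := if c = '?' then -1 else (c.toNat : Int) - 65

def pvIsWild (s : String) (i : Int) : Bool := pvIdentB ((PySem.Str.pyGet? s i).getD '?') == -1

def pvChain (q : Int) (n : Nat) : Int := (List.range n).foldl (fun p _ => PySem.Int.mod (p * 26) q) 1

def pvValStep (s : String) (q : Int) (v i : Int) : Int :=
  let v' := PySem.Int.mod (v * 26) q
  let d := pvIdentB ((PySem.Str.pyGet? s i).getD '?')
  if d ≠ -1 then PySem.Int.mod (v' + d) q else v'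

def wildcard_pat_hash_alt (s : String) (low : Int) (high : Int) (q : Int) : Int × Int × Int × Int :=
  let wilds := (PySem.List.pyRange low high 1).filter (pvIsWild s)
  let q_pos := wilds.getLast?.getD (-1)
  let val := (PySem.List.pyRange low high 1).foldl (pvValStep s q) 0
  let p1 := pvChain q (max 0 (high - low - 1)).toNat
  let p2 := match wilds.head? with
            | none => 1
            | some f => pvChain q (high - 1 - f).toNat
  (val, q_pos, p1, p2)

-- ===== PRECONDITION & SPEC =====
-- Pre_ excludes (i) the inputs where A raises (q = 0 or an index of [low,high) out of range:
-- ZeroDivisionError / IndexError) and (ii) windows starting at a negative index: those are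
-- outside the function's natural domain (low, high are substring endpoints), and there Python's
-- negative-index wraparound collides with A's q_pos = -1 sentinel (the character at index -1 is
-- silently dropped from the hash and pre_comp2 stays frozen) — both behaviours are accidents of
-- the sentinel that no caller would specify; B does the natural thing there.
def Pre_wildcard_pat_hash (s : String) (low : Int) (high : Int) (q : Int) : Prop :=
  low < high → (0 ≤ low ∧ high ≤ (s.toList.length : Int) ∧ q ≠ 0)
instance (s : String) (low : Int) (high : Int) (q : Int) : Decidable (Pre_wildcard_pat_hash s low high q) := by unfold Pre_wildcard_pat_hash; infer_instance

def pvWitness_wildcard_pat_hash : String × Int × Int × Int := ("A?B", 0, 3, 97)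

def Spec_wildcard_pat_hash (s : String) (low : Int) (high : Int) (q : Int) (out : Int × Int × Int × Int) : Prop := out = wildcard_pat_hash_alt s low high q
instance (s : String) (low : Int) (high : Int) (q : Int) (out : Int × Int × Int × Int) : Decidable (Spec_wildcard_pat_hash s low high q out) := by unfold Spec_wildcard_pat_hash; infer_instance

-- ===== CLAIM (what is proved, stated in full; the proofs are below) =====
def Claim_equal_wildcard_pat_hash : Prop := ∀ (s : String) (low : Int) (high : Int) (q : Int), Dom_wildcard_pat_hash s low high q → Pre_wildcard_pat_hash s low high q → Spec_wildcard_pat_hash s low high q (wildcard_pat_hash s low high q)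

-- ===== LEMMAS AND PROOFS =====

theorem pvChain_succ (q : Int) (n : Nat) :
    pvChain q (n + 1) = PySem.Int.mod (pvChain q n * 26) q := by
  simp [pvChain, List.range_succ]

-- one iteration of A's loop body, expressed through B's pieces
theorem pvStep_eq (s : String) (high q j : Int) (W : List Int) (V p1 p2j : Int)
    (hj : 0 ≤ j) (hW : ∀ x ∈ W, 0 ≤ x ∧ x < j)
    (hp2 : p2j = match W.head? with
                 | none => 1
                 | some f => pvChain q (j - 1 - f).toNat) :
    pvStepA s high q (W.getLast?.getD (-1), V, p1, p2j) j =
      ( (W ++ (if pvIsWild s j then [j] else [])).getLast?.getD (-1),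
        pvValStep s q V j,
        (if j = high - 1 then p1 else PySem.Int.mod (p1 * 26) q),
        match (W ++ (if pvIsWild s j then [j] else [])).head? with
        | none => 1
        | some f => pvChain q (j + 1 - 1 - f).toNat ) := by
  have hj1 : ¬ (j : Int) = -1 := by omega
  have hab : ∀ c, pvIdentA c = pvIdentB c := fun _ => rfl
  rcases W with _ | ⟨f, rest⟩
  · -- no wildcard seen yet: q_pos sentinel -1, pre_comp2 untouched
    simp only [List.head?_nil] at hp2
    by_cases hw : pvIsWild s j = true
    · have hid : pvIdentB ((PySem.List.pyGet? s.toList j).getD '?') = -1 := by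
        simpa [pvIsWild, PySem.Str.pyGet?] using hw
      simp [pvStepA, pvValStep, PySem.Str.pyGet?, hw, hp2, pvChain, hid, hab]
    · have hid : ¬ pvIdentB ((PySem.List.pyGet? s.toList j).getD '?') = -1 := by
        simpa [pvIsWild, PySem.Str.pyGet?] using hw
      simp [pvStepA, pvValStep, PySem.Str.pyGet?, hw, hj1, hp2, hid, hab]
  · -- wildcards already seen: last one is ≥ 0, pre_comp2 advances
    have hne : (f :: rest) ≠ [] := by simp
    have hlast : (f :: rest).getLast? = some ((f :: rest).getLast hne) :=
      List.getLast?_eq_some_getLast hne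
    have hlb := hW _ (List.getLast_mem hne)
    have h0 : (0 : Int) ≤ (f :: rest).getLast hne := hlb.1
    have hjne : ¬ (j : Int) = (f :: rest).getLast hne := by omega
    have hf := hW f (by simp)
    simp only [List.head?_cons] at hp2
    have hchain : PySem.Int.mod (pvChain q (j - 1 - f).toNat * 26) q
        = pvChain q (j + 1 - 1 - f).toNat := by
      rw [show ((j + 1 - 1 - f).toNat = (j - 1 - f).toNat + 1) by omega, pvChain_succ]
    have hcat : (f :: (rest ++ [j])).getLast? = some j := by
      rw [show (f :: (rest ++ [j])) = (f :: rest) ++ [j] from rfl]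
      exact List.getLast?_concat
    by_cases hw : pvIsWild s j = true
    · have hid : pvIdentB ((PySem.List.pyGet? s.toList j).getD '?') = -1 := by
        simpa [pvIsWild, PySem.Str.pyGet?] using hw
      simp [pvStepA, pvValStep, PySem.Str.pyGet?, hw, hp2, hlast, h0, hcat, hchain, hid, hab]
    · have hid : ¬ pvIdentB ((PySem.List.pyGet? s.toList j).getD '?') = -1 := by
        simpa [pvIsWild, PySem.Str.pyGet?] using hw
      simp [pvStepA, pvValStep, PySem.Str.pyGet?, hw, hp2, hlast, h0, hchain, hjne, hid, hab]

-- elements of the wildcard list of [low, j) lie in [low, j)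
theorem pvWilds_mem (s : String) (low j : Int) :
    ∀ x ∈ (PySem.List.pyRange low j 1).filter (pvIsWild s), low ≤ x ∧ x < j := by
  intro x hx
  have := List.of_mem_filter hx
  have hm := List.mem_of_mem_filter hx
  exact (PySem.List.mem_pyRange_one).1 hm

-- loop invariant: A's fold over [low, low+n) in terms of B's quantities (n iterations,
-- none of them the last one, so pre_comp1 has been multiplied n times)
theorem pvInv (s : String) (low high q : Int) (hlow : 0 ≤ low) :
    ∀ (n : Nat), low + n + 1 ≤ high →
    (PySem.List.pyRange low (low + n) 1).foldl (pvStepA s high q) (-1, 0, 1, 1) =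
      ( ((PySem.List.pyRange low (low + n) 1).filter (pvIsWild s)).getLast?.getD (-1),
        (PySem.List.pyRange low (low + n) 1).foldl (pvValStep s q) 0,
        pvChain q n,
        match ((PySem.List.pyRange low (low + n) 1).filter (pvIsWild s)).head? with
        | none => 1
        | some f => pvChain q (low + n - 1 - f).toNat ) := by
  intro n
  induction n with
  | zero =>
    intro _
    rw [PySem.List.pyRange_one_eq_nil (by omega)]
    simp [pvChain]
  | succ n ih =>
    intro hn
    have hsplit : PySem.List.pyRange low (low + (n + 1 : Nat)) 1
        = PySem.List.pyRange low (low + n) 1 ++ [low + n] := by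
      rw [show (low + (n + 1 : Nat) : Int) = (low + n) + 1 by push_cast; ring]
      exact PySem.List.pyRange_one_succ_right (by omega)
    have ih' := ih (by omega)
    rw [hsplit, List.foldl_append, List.foldl_append, ih', List.foldl_cons, List.foldl_nil,
        List.foldl_cons, List.foldl_nil]
    have hstep := pvStep_eq s high q (low + n)
      ((PySem.List.pyRange low (low + n) 1).filter (pvIsWild s))
      ((PySem.List.pyRange low (low + n) 1).foldl (pvValStep s q) 0)
      (pvChain q n) _ (by omega)
      (fun x hx => by have := pvWilds_mem s low (low + n) x hx; omega) rfl
    rw [hstep]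
    have hfilter : (PySem.List.pyRange low (low + n) 1).filter (pvIsWild s)
          ++ (if pvIsWild s (low + n) then [low + n] else [])
        = ((PySem.List.pyRange low (low + n) 1).filter (pvIsWild s))
          ++ (List.filter (pvIsWild s) [low + n]) := by
      by_cases hw : pvIsWild s (low + n) = true <;> simp [hw]
    have hnolast : ¬ (low + n : Int) = high - 1 := by omega
    rw [hfilter, ← List.filter_append, ← hsplit]
    simp only [hnolast, if_false, ← pvChain_succ]
    rw [show (low + (n + 1 : Nat) - 1 : Int) = low + n + 1 - 1 by push_cast; ring]

-- ===== VERDICT (by name: the statement is the Claim_ definition above) =====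
theorem wildcard_pat_hash_spec : Claim_equal_wildcard_pat_hash := by
  intro s low high q _ hpre
  unfold Spec_wildcard_pat_hash
  by_cases hlt : low < high
  · obtain ⟨hlow, -, -⟩ := hpre hlt
    set n : Nat := (high - 1 - low).toNat with hn
    have hsplit : PySem.List.pyRange low high 1
        = PySem.List.pyRange low (low + n) 1 ++ [low + n] := by
      rw [show (high : Int) = (low + n) + 1 by omega]
      exact PySem.List.pyRange_one_succ_right (by omega)
    have hinv := pvInv s low high q hlow n (by omega)
    have hstep := pvStep_eq s high q (low + n)
      ((PySem.List.pyRange low (low + n) 1).filter (pvIsWild s))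
      ((PySem.List.pyRange low (low + n) 1).foldl (pvValStep s q) 0)
      (pvChain q n) _ (by omega)
      (fun x hx => by have := pvWilds_mem s low (low + n) x hx; omega) rfl
    have hislast : (low + n : Int) = high - 1 := by omega
    have hmax : (max 0 (high - low - 1)).toNat = n := by omega
    simp only [wildcard_pat_hash, wildcard_pat_hash_alt]
    rw [hsplit, List.foldl_append, List.foldl_cons, List.foldl_nil, hinv, hstep]
    simp only [List.filter_append, List.foldl_append, List.foldl_cons, List.foldl_nil,
      List.filter_singleton, hislast, if_true, Bool.cond_eq_ite, hmax,
      show (high - 1 + 1 - 1 : Int) = high - 1 by omega]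
  · simp only [wildcard_pat_hash, wildcard_pat_hash_alt,
      PySem.List.pyRange_one_eq_nil (show high ≤ low by omega)]
    simp [pvChain, show (max 0 (high - low - 1)).toNat = 0 by omega]
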